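-- pv_equiv track=rewrite | github.com/InfantIvan/DailyChallenge | Vowel_balance.py | vowel_balance
-- ===== SOURCE A (Python) =====
-- def vowel_balance(s):
--     """
--     Simple vowel balance checker.
--
--     Args:
--         s (str): Input string to check
--
--     Returns:
--         bool: True if vowel counts in both halves are equal, False otherwise
--     """
--     # Define vowels (both uppercase and lowercase)
--     vowels = set('aeiouAEIOU')
--
--     # Get the length of the string
--     length = len(s)
--
--     # Calculate the midpoint (ignore center character if odd length)
--     mid = length // 2
--
--     # Split the string into two halves
--     first_half = s[:mid]
--     second_half = s[mid + (length % 2):]  # Skip center character if odd length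
--
--     # Count vowels in each half
--     first_half_vowels = sum(1 for char in first_half if char in vowels)
--     second_half_vowels = sum(1 for char in second_half if char in vowels)
--
--     # Return True if vowel counts are equal
--     return first_half_vowels == second_half_vowels
-- ===== SOURCE B (Python) =====
-- def vowel_balance(s):
--     """Single signed-accumulator pass over enumerate(s) instead of slicing into halves."""
--     vowels = set('aeiouAEIOU')
--     n = len(s)
--     mid = n // 2
--     lo = mid + n % 2  # first index of the second half (skips the center char if n is odd)
--     bal = 0
--     for i, ch in enumerate(s):
--         if ch in vowels:
--             if i < mid:
--                 bal += 1
--             elif i >= lo: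
--                 bal -= 1
--     return bal == 0
-- ===== Notes on version B (the rewrite author's own statement) =====
-- stated objective: alternative
-- what changed: Replaces A's two slice-and-count passes (materialising both halves) with one signed-accumulator pass over enumerate(s): +1 for a vowel before the midpoint, -1 for one at or after mid + n%2, returning balance == 0.
import Mathlib
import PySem

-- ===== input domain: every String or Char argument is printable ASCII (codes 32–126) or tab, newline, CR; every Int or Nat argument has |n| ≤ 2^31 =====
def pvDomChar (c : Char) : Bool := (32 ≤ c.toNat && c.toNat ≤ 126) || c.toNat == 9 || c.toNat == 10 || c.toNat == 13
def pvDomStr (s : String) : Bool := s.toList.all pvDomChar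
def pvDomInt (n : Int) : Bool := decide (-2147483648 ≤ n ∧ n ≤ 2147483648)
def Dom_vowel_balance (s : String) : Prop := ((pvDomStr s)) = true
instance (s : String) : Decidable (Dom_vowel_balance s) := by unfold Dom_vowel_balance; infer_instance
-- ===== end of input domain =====

-- B replaces A's two slice-and-count passes with one signed-accumulator pass over enumerate(s) (alternative decomposition, same cost).

-- ===== PORT A =====
def vowel_balance (s : String) : Bool :=
  let vowels : PySem.Set Char := PySem.Set.ofList "aeiouAEIOU".toList
  let l := s.toList
  let length : Int := l.length
  let mid : Int := PySem.Int.floordiv length 2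
  let first_half := PySem.List.slice l none (some mid)
  let second_half := PySem.List.slice l (some (mid + PySem.Int.mod length 2)) none
  let first_half_vowels : Int :=
    first_half.foldl (fun acc c => if vowels.contains c then acc + 1 else acc) 0
  let second_half_vowels : Int :=
    second_half.foldl (fun acc c => if vowels.contains c then acc + 1 else acc) 0
  first_half_vowels == second_half_vowels

-- ===== PORT B =====
def vowel_balance_alt (s : String) : Bool :=
  let vowels : PySem.Set Char := PySem.Set.ofList "aeiouAEIOU".toList
  let l := s.toList
  let n : Int := l.length
  let mid : Int := PySem.Int.floordiv n 2
  let lo : Int := mid + PySem.Int.mod n 2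
  let bal : Int := (PySem.List.enumerate l).foldl
    (fun b p =>
      if vowels.contains p.2 then
        (if p.1 < mid then b + 1 else if p.1 ≥ lo then b - 1 else b)
      else b) 0
  bal == 0

-- ===== PRECONDITION & SPEC =====
def Spec_vowel_balance (s : String) (out : Bool) : Prop := out = vowel_balance_alt s
instance (s : String) (out : Bool) : Decidable (Spec_vowel_balance s out) := by unfold Spec_vowel_balance; infer_instance

-- ===== CLAIM (what is proved, stated in full; the proofs are below) =====
def Claim_equal_vowel_balance : Prop := ∀ (s : String), Dom_vowel_balance s → Spec_vowel_balance s (vowel_balance s)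

-- ===== LEMMAS AND PROOFS =====

-- B's loop body, abbreviated for the lemmas below
def pvStep (V : PySem.Set Char) (mid lo : Int) (b : Int) (p : Int × Char) : Int :=
  if V.contains p.2 then (if p.1 < mid then b + 1 else if p.1 ≥ lo then b - 1 else b) else b

lemma pvEnum_append (xs ys : List Char) (j : Int) :
    PySem.List.enumerate (xs ++ ys) j
      = PySem.List.enumerate xs j ++ PySem.List.enumerate ys (j + xs.length) := by
  induction xs generalizing j with
  | nil => simp [PySem.List.enumerate]
  | cons c t ih =>
      simp only [List.cons_append, PySem.List.enumerate_cons, List.length_cons, ih]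
      congr 3
      push_cast; omega

-- all indices below mid: every vowel adds 1
lemma pvFold_low (V : PySem.Set Char) (mid lo : Int) (l : List Char) (j b : Int)
    (h : j + l.length ≤ mid) :
    (PySem.List.enumerate l j).foldl (pvStep V mid lo) b
      = b + (l.countP (fun c => V.contains c) : Int) := by
  induction l generalizing j b with
  | nil => simp [PySem.List.enumerate]
  | cons c t ih =>
      simp only [List.length_cons] at h
      push_cast at h
      have hj : j < mid := by omega
      rw [PySem.List.enumerate_cons]
      simp only [List.foldl_cons]
      rw [ih (j + 1) _ (by omega)]
      by_cases hv : V.contains c = true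
      · have hv' : c ∈ V := by simpa using hv
        simp [pvStep, hv', hj]
        omega
      · have hv' : ¬ c ∈ V := by simpa using hv
        simp [pvStep, hv']

-- middle zone: nothing changes
lemma pvFold_midzone (V : PySem.Set Char) (mid lo : Int) (l : List Char) (j b : Int)
    (h1 : mid ≤ j) (h2 : j + l.length ≤ lo) :
    (PySem.List.enumerate l j).foldl (pvStep V mid lo) b = b := by
  induction l generalizing j b with
  | nil => simp [PySem.List.enumerate]
  | cons c t ih =>
      simp only [List.length_cons] at h2
      push_cast at h2
      have hj1 : ¬ j < mid := by omega
      have hj2 : ¬ j ≥ lo := by omega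
      rw [PySem.List.enumerate_cons]
      simp only [List.foldl_cons]
      rw [ih (j + 1) _ (by omega) (by omega)]
      simp [pvStep, hj1, hj2]

-- all indices at or past lo: every vowel subtracts 1
lemma pvFold_high (V : PySem.Set Char) (mid lo : Int) (l : List Char) (j b : Int)
    (hml : mid ≤ lo) (h : lo ≤ j) :
    (PySem.List.enumerate l j).foldl (pvStep V mid lo) b
      = b - (l.countP (fun c => V.contains c) : Int) := by
  induction l generalizing j b with
  | nil => simp [PySem.List.enumerate]
  | cons c t ih =>
      have hj1 : ¬ j < mid := by omega
      have hj2 : j ≥ lo := h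
      rw [PySem.List.enumerate_cons]
      simp only [List.foldl_cons]
      rw [ih (j + 1) _ (by omega)]
      by_cases hv : V.contains c = true
      · have hv' : c ∈ V := by simpa using hv
        simp [pvStep, hv', hj1, hj2]
        omega
      · have hv' : ¬ c ∈ V := by simpa using hv
        simp [pvStep, hv']

lemma pvBal (V : PySem.Set Char) (l : List Char) (m k : Nat)
    (hm : m ≤ k) (hk : k ≤ l.length) :
    (PySem.List.enumerate l 0).foldl (pvStep V (m : Int) (k : Int)) 0
      = ((l.take m).countP (fun c => V.contains c) : Int)
        - ((l.drop k).countP (fun c => V.contains c) : Int) := by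
  have hdd : l.drop k = (l.drop m).drop (k - m) := by
    rw [List.drop_drop]; congr 1; omega
  have hsplit : l = l.take m ++ ((l.drop m).take (k - m) ++ (l.drop m).drop (k - m)) := by
    rw [List.take_append_drop, List.take_append_drop]
  have hlen1 : (l.take m).length = m := by
    rw [List.length_take]; omega
  have hlen2 : ((l.drop m).take (k - m)).length = k - m := by
    rw [List.length_take, List.length_drop]; omega
  rw [hdd]
  conv_lhs => rw [hsplit]
  rw [pvEnum_append, List.foldl_append, pvEnum_append, List.foldl_append]
  rw [pvFold_high V _ _ _ _ _ (by exact_mod_cast hm) (by rw [hlen1, hlen2]; omega)]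
  rw [pvFold_midzone V _ _ _ _ _ (by rw [hlen1]; omega) (by rw [hlen1, hlen2]; omega)]
  rw [pvFold_low V _ _ _ _ _ (by rw [hlen1]; omega)]
  ring

-- A's per-half counting loop is a countP
lemma pvCnt (V : PySem.Set Char) (l : List Char) :
    l.foldl (fun acc c => if V.contains c then acc + 1 else acc) (0 : Int)
      = (l.countP (fun c => V.contains c) : Int) := by
  simpa using PySem.List.foldl_count_if (fun c => V.contains c) l 0

lemma pvBeq_sub (a b : Int) : (a == b) = (a - b == 0) := by
  by_cases h : a = b <;> simp [h, sub_eq_zero]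

-- ===== VERDICT (by name: the statement is the Claim_ definition above) =====
theorem vowel_balance_spec : Claim_equal_vowel_balance := by
  intro s _
  unfold Spec_vowel_balance vowel_balance vowel_balance_alt
  have hmid : PySem.Int.floordiv ((s.toList.length : Nat) : Int) 2
      = ((s.toList.length / 2 : Nat) : Int) := by
    rw [PySem.Int.floordiv_eq_ediv_of_pos (by norm_num)]; omega
  have hmod : PySem.Int.mod ((s.toList.length : Nat) : Int) 2
      = ((s.toList.length % 2 : Nat) : Int) := by
    rw [PySem.Int.mod_eq_emod_of_pos (by norm_num)]; omega
  simp only [hmid, hmod]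
  rw [show ((s.toList.length / 2 : Nat) : Int) + ((s.toList.length % 2 : Nat) : Int)
      = ((s.toList.length / 2 + s.toList.length % 2 : Nat) : Int) by push_cast; ring]
  rw [PySem.List.slice_to_natCast, PySem.List.slice_from_natCast]
  rw [pvCnt, pvCnt]
  have hb := pvBal (PySem.Set.ofList "aeiouAEIOU".toList) s.toList
      (s.toList.length / 2) (s.toList.length / 2 + s.toList.length % 2)
      (by omega) (by omega)
  rw [pvBeq_sub]
  congr 1
  exact hb.symm
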